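-- pv_equiv track=rewrite | github.com/ptrandev/cs330 | hw11/problem1.py | Chocolate
-- ===== SOURCE A (Python) =====
-- def Chocolate(arr):
--     N = len(arr) - 1  # Length of array
--     C = {}  # memoization table
--
--     def OPT(start, end):
--         # Base case; no elements left
--         if end < start:
--             return 0
--
--         # recursive case
--         if (start, end) not in C:
--             # determine if it's the opponent's turn
--             is_opponent_turn = (end - start + 1) % 2 == N % 2
--
--             # opponent's turn, choose worst move for me (best move for opponent)
--             if is_opponent_turn:
--                 they_chose_left = OPT(start + 1, end)
--                 they_chose_right = OPT(start, end - 1)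
--
--                 C[(start, end)] = min(they_chose_left, they_chose_right)
--             # my turn, choose best move for me
--             else:
--                 we_chose_left = OPT(start + 1, end) + arr[start]
--                 we_chose_right = OPT(start, end - 1) + arr[end]
--
--                 C[(start, end)] = max(we_chose_left, we_chose_right)
--
--         return C[(start, end)]  # Return result from memoization table
--
--     def FindSolution(start, end):
--
--         S = [] # solution set of moves
--         player_one_turn = True
--
--         while start >= 0 and end >= start:
--             choose_left = C[(start+1, end)] if (start+1, end) in C else 0
--             choose_right = C[(start,end-1)] if (start,end-1) in C else 0
--
--             if player_one_turn:
--                 choose_left = choose_left + arr[start]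
--                 choose_right = choose_right + arr[end]
--
--                 if choose_left > choose_right:
--                     S.append(start)
--                     start += 1
--                 else:
--                     S.append(end)
--                     end -= 1
--             else:
--                 if choose_left <= choose_right:
--                     start += 1
--                 else:
--                     end -= 1
--
--             player_one_turn = not player_one_turn
--
--         return S # return the set of moves we should make
--
--     total_chocolate = OPT(0, N) # amount of chocolate we can expect to win
--     moves = FindSolution(0, N) # the list of moves we should take
--
--     return total_chocolate, moves
-- ===== SOURCE B (Python) =====
-- def Chocolate(arr):
--     N = len(arr) - 1
--     C = {}
--
--     # bottom-up interval DP: fill C for every interval, shortest lengths first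
--     L = 1
--     while L <= len(arr):
--         start = 0
--         while start <= len(arr) - L:
--             end = start + L - 1
--             left = C[(start + 1, end)] if (start + 1, end) in C else 0
--             right = C[(start, end - 1)] if (start, end - 1) in C else 0
--             if L % 2 == N % 2:
--                 C[(start, end)] = min(left, right)
--             else:
--                 C[(start, end)] = max(left + arr[start], right + arr[end])
--             start += 1
--         L += 1
--
--     # reconstruct the move sequence from the table
--     S = []
--     player_one_turn = True
--     start, end = 0, N
--     while start >= 0 and end >= start:
--         choose_left = C[(start + 1, end)] if (start + 1, end) in C else 0
--         choose_right = C[(start, end - 1)] if (start, end - 1) in C else 0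
--         if player_one_turn:
--             if choose_left + arr[start] > choose_right + arr[end]:
--                 S.append(start)
--                 start += 1
--             else:
--                 S.append(end)
--                 end -= 1
--         else:
--             if choose_left <= choose_right:
--                 start += 1
--             else:
--                 end -= 1
--         player_one_turn = not player_one_turn
--
--     total = C[(0, N)] if (0, N) in C else 0
--     return total, S
-- ===== Notes on version B (the rewrite author's own statement) =====
-- stated objective: alternative
-- what changed: The top-down memoized recursion OPT is replaced by an explicit bottom-up fill of the same interval table (two nested while loops over interval lengths and start positions), and the total is read off the table instead of being the recursion's return value; the move reconstruction is unchanged.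
import Mathlib
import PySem

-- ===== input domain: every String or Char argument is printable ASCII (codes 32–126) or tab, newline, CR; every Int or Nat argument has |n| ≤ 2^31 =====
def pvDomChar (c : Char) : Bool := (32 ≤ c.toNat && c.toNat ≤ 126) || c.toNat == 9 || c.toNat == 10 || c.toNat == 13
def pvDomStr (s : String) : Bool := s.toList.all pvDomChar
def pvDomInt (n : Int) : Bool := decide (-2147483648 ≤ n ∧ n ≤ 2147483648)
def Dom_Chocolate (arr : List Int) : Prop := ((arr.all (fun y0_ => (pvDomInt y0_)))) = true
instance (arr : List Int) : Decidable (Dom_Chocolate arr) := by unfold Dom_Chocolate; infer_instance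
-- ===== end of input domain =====

-- B replaces A's top-down memoized recursion by a bottom-up fill of the same interval table
-- (objective: alternative decomposition, same O(n^2) cost); the move reconstruction is unchanged.

-- ===== PORT A =====
-- OPT ported with a fuel parameter (always sufficient: each call shrinks the interval by one);
-- arr[start]/arr[end] ported with pyGetD: whenever those lines run the index is in range.
def ChocOPT (arr : List Int) (N : Int) :
    Nat → Int → Int → PySem.Dict (Int × Int) Int → Int × PySem.Dict (Int × Int) Int
  | 0, _, _, C => (0, C)
  | fuel + 1, s, e, C =>
    if e < s then (0, C)
    else if C.contains (s, e) then (C.getD (s, e) 0, C)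
    else if PySem.Int.mod (e - s + 1) 2 = PySem.Int.mod N 2 then
      let p1 := ChocOPT arr N fuel (s + 1) e C
      let p2 := ChocOPT arr N fuel s (e - 1) p1.2
      let C2 := p2.2.insert (s, e) (min p1.1 p2.1)
      (C2.getD (s, e) 0, C2)
    else
      let p1 := ChocOPT arr N fuel (s + 1) e C
      let l := p1.1 + PySem.List.pyGetD arr s 0
      let p2 := ChocOPT arr N fuel s (e - 1) p1.2
      let r := p2.1 + PySem.List.pyGetD arr e 0
      let C2 := p2.2.insert (s, e) (max l r)
      (C2.getD (s, e) 0, C2)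

-- FindSolution's while loop, fuel = arr.length + 1 (the interval shrinks each iteration)
def ChocFindA (arr : List Int) (C : PySem.Dict (Int × Int) Int) :
    Nat → Int → Int → Bool → List Int → List Int
  | 0, _, _, _, S => S
  | fuel + 1, s, e, p, S =>
    if 0 ≤ s ∧ s ≤ e then
      let cl := C.getD (s + 1, e) 0
      let cr := C.getD (s, e - 1) 0
      if p then
        let cl := cl + PySem.List.pyGetD arr s 0
        let cr := cr + PySem.List.pyGetD arr e 0
        if cr < cl then ChocFindA arr C fuel (s + 1) e (!p) (S ++ [s])
        else ChocFindA arr C fuel s (e - 1) (!p) (S ++ [e])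
      else
        if cl ≤ cr then ChocFindA arr C fuel (s + 1) e (!p) S
        else ChocFindA arr C fuel s (e - 1) (!p) S
    else S

def Chocolate (arr : List Int) : Int × List Int :=
  let N := PySem.List.len arr - 1
  let p := ChocOPT arr N (arr.length + 1) 0 N .empty
  (p.1, ChocFindA arr p.2 (arr.length + 1) 0 N true [])

-- ===== PORT B =====
-- inner while loop: all intervals of length L, left to right
def ChocRow (arr : List Int) (N L : Int) :
    Nat → Int → PySem.Dict (Int × Int) Int → PySem.Dict (Int × Int) Int
  | 0, _, C => C
  | fuel + 1, s, C =>
    if s ≤ PySem.List.len arr - L then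
      let e := s + L - 1
      let left := C.getD (s + 1, e) 0
      let right := C.getD (s, e - 1) 0
      let C' := if PySem.Int.mod L 2 = PySem.Int.mod N 2 then C.insert (s, e) (min left right)
        else C.insert (s, e) (max (left + PySem.List.pyGetD arr s 0) (right + PySem.List.pyGetD arr e 0))
      ChocRow arr N L fuel (s + 1) C'
    else C

-- outer while loop over interval lengths L = 1 .. len(arr)
def ChocFill (arr : List Int) (N : Int) :
    Nat → Int → PySem.Dict (Int × Int) Int → PySem.Dict (Int × Int) Int
  | 0, _, C => C
  | fuel + 1, L, C =>
    if L ≤ PySem.List.len arr then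
      ChocFill arr N fuel (L + 1) (ChocRow arr N L (arr.length + 1) 0 C)
    else C

-- B's reconstruction loop (same code as A's, reading B's table)
def ChocFindB (arr : List Int) (C : PySem.Dict (Int × Int) Int) :
    Nat → Int → Int → Bool → List Int → List Int
  | 0, _, _, _, S => S
  | fuel + 1, s, e, p, S =>
    if 0 ≤ s ∧ s ≤ e then
      let cl := C.getD (s + 1, e) 0
      let cr := C.getD (s, e - 1) 0
      if p then
        let cl := cl + PySem.List.pyGetD arr s 0
        let cr := cr + PySem.List.pyGetD arr e 0
        if cr < cl then ChocFindB arr C fuel (s + 1) e (!p) (S ++ [s])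
        else ChocFindB arr C fuel s (e - 1) (!p) (S ++ [e])
      else
        if cl ≤ cr then ChocFindB arr C fuel (s + 1) e (!p) S
        else ChocFindB arr C fuel s (e - 1) (!p) S
    else S

def Chocolate_alt (arr : List Int) : Int × List Int :=
  let N := PySem.List.len arr - 1
  let C := ChocFill arr N (arr.length + 1) 1 .empty
  let S := ChocFindB arr C (arr.length + 1) 0 N true []
  (C.getD (0, N) 0, S)

-- ===== PRECONDITION & SPEC =====
def Spec_Chocolate (arr : List Int) (out : Int × List Int) : Prop := out = Chocolate_alt arr
instance (arr : List Int) (out : Int × List Int) : Decidable (Spec_Chocolate arr out) := by unfold Spec_Chocolate; infer_instance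

-- ===== CLAIM (what is proved, stated in full; the proofs are below) =====
def Claim_equal_Chocolate : Prop := ∀ (arr : List Int), Dom_Chocolate arr → Spec_Chocolate arr (Chocolate arr)

-- ===== LEMMAS AND PROOFS =====

-- the pure interval value both tables store (fuel-indexed; ChocVc uses the exact fuel)
def ChocV (arr : List Int) (N : Int) : Nat → Int → Int → Int
  | 0, _, _ => 0
  | fuel + 1, s, e =>
    if e < s then 0
    else if PySem.Int.mod (e - s + 1) 2 = PySem.Int.mod N 2 then
      min (ChocV arr N fuel (s + 1) e) (ChocV arr N fuel s (e - 1))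
    else
      max (ChocV arr N fuel (s + 1) e + PySem.List.pyGetD arr s 0)
          (ChocV arr N fuel s (e - 1) + PySem.List.pyGetD arr e 0)

def ChocVc (arr : List Int) (N s e : Int) : Int := ChocV arr N (e - s + 1).toNat s e

lemma chocVc_neg (arr : List Int) (N s e : Int) (h : e < s) : ChocVc arr N s e = 0 := by
  unfold ChocVc
  have : (e - s + 1).toNat = 0 := by omega
  rw [this]
  rfl

lemma chocVc_rec (arr : List Int) (N s e : Int) (h : s ≤ e) :
    ChocVc arr N s e =
      if PySem.Int.mod (e - s + 1) 2 = PySem.Int.mod N 2 then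
        min (ChocVc arr N (s + 1) e) (ChocVc arr N s (e - 1))
      else
        max (ChocVc arr N (s + 1) e + PySem.List.pyGetD arr s 0)
            (ChocVc arr N s (e - 1) + PySem.List.pyGetD arr e 0) := by
  unfold ChocVc
  have h1 : (e - s + 1).toNat = (e - s).toNat + 1 := by omega
  have h2 : (e - (s + 1) + 1).toNat = (e - s).toNat := by omega
  have h3 : (e - 1 - s + 1).toNat = (e - s).toNat := by omega
  rw [h1, h2, h3]
  simp only [ChocV, if_neg (by omega : ¬ e < s)]

-- invariant for A's memo table: every present key holds the right value and all its
-- sub-intervals are present too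
def ChocClosed (arr : List Int) (N : Int) (C : PySem.Dict (Int × Int) Int) : Prop :=
  ∀ u v : Int, (C.get? (u, v)).isSome = true →
    (C.get? (u, v) = some (ChocVc arr N u v) ∧
     ∀ u' v' : Int, u ≤ u' → u' ≤ v' → v' ≤ v → (C.get? (u', v')).isSome = true)

lemma chocClosed_of_desc (arr : List Int) (N s e : Int)
    (C D : PySem.Dict (Int × Int) Int) (hC : ChocClosed arr N C)
    (hD : ∀ u v : Int, D.get? (u, v) =
      if s ≤ u ∧ u ≤ v ∧ v ≤ e then some (ChocVc arr N u v) else C.get? (u, v)) :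
    ChocClosed arr N D := by
  intro u v hsome
  rw [hD] at hsome
  by_cases hb : s ≤ u ∧ u ≤ v ∧ v ≤ e
  · constructor
    · rw [hD, if_pos hb]
    · intro u' v' h1 h2 h3
      rw [hD, if_pos (by omega)]
      rfl
  · rw [if_neg hb] at hsome
    obtain ⟨hv, hsub⟩ := hC u v hsome
    refine ⟨by rw [hD, if_neg hb]; exact hv, ?_⟩
    intro u' v' h1 h2 h3
    rw [hD]
    by_cases hb' : s ≤ u' ∧ u' ≤ v' ∧ v' ≤ e
    · rw [if_pos hb']; rfl
    · rw [if_neg hb']; exact hsub u' v' h1 h2 h3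

lemma chocOPT_spec (arr : List Int) (N : Int) :
    ∀ (fuel : Nat) (s e : Int) (C : PySem.Dict (Int × Int) Int),
      (e - s + 1).toNat ≤ fuel → ChocClosed arr N C →
      (ChocOPT arr N fuel s e C).1 = ChocVc arr N s e ∧
      ∀ u v : Int, ((ChocOPT arr N fuel s e C).2).get? (u, v) =
        if s ≤ u ∧ u ≤ v ∧ v ≤ e then some (ChocVc arr N u v) else C.get? (u, v) := by
  intro fuel
  induction fuel with
  | zero =>
    intro s e C hf hC
    have hes : e < s := by omega
    refine ⟨?_, ?_⟩
    · simp only [ChocOPT]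
      exact (chocVc_neg arr N s e hes).symm
    · intro u v
      simp only [ChocOPT]
      rw [if_neg (by omega : ¬ (s ≤ u ∧ u ≤ v ∧ v ≤ e))]
  | succ f ih =>
    intro s e C hf hC
    by_cases hes : e < s
    · simp only [ChocOPT, if_pos hes]
      refine ⟨(chocVc_neg arr N s e hes).symm, ?_⟩
      intro u v
      rw [if_neg (by omega : ¬ (s ≤ u ∧ u ≤ v ∧ v ≤ e))]
    · by_cases hmem : C.contains (s, e) = true
      · have hsome : (C.get? (s, e)).isSome = true := by
          rw [← PySem.Dict.contains_eq_isSome_get?]; exact hmem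
        obtain ⟨hval, hsub⟩ := hC s e hsome
        simp only [ChocOPT, if_neg hes, if_pos hmem]
        refine ⟨?_, ?_⟩
        · rw [PySem.Dict.getD_eq_get?_getD, hval]; rfl
        · intro u v
          by_cases hb : s ≤ u ∧ u ≤ v ∧ v ≤ e
          · rw [if_pos hb]
            exact (hC u v (hsub u v hb.1 hb.2.1 hb.2.2)).1
          · rw [if_neg hb]
      · have hf1 : (e - (s + 1) + 1).toNat ≤ f := by omega
        have hf2 : (e - 1 - s + 1).toNat ≤ f := by omega
        obtain ⟨v1, d1⟩ := ih (s + 1) e C hf1 hC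
        have hC1 : ChocClosed arr N (ChocOPT arr N f (s + 1) e C).2 :=
          chocClosed_of_desc arr N (s + 1) e C _ hC d1
        obtain ⟨v2, d2⟩ := ih s (e - 1) (ChocOPT arr N f (s + 1) e C).2 hf2 hC1
        by_cases hm : PySem.Int.mod (e - s + 1) 2 = PySem.Int.mod N 2
        · have hval : min (ChocOPT arr N f (s + 1) e C).1
              (ChocOPT arr N f s (e - 1) (ChocOPT arr N f (s + 1) e C).2).1
              = ChocVc arr N s e := by
            rw [v1, v2, chocVc_rec arr N s e (by omega), if_pos hm]
          simp only [ChocOPT, if_neg hes, if_neg hmem, if_pos hm]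
          refine ⟨?_, ?_⟩
          · rw [PySem.Dict.getD_eq_get?_getD, PySem.Dict.get?_insert_self, hval]; rfl
          · intro u v
            rw [PySem.Dict.get?_insert]
            by_cases huv : (u, v) = ((s, e) : Int × Int)
            · obtain ⟨hu, hv⟩ := Prod.mk.injEq .. ▸ huv
              rw [if_pos huv, hval, if_pos (by omega : s ≤ u ∧ u ≤ v ∧ v ≤ e), hu, hv]
            · have hne : ¬ (u = s ∧ v = e) := by
                intro ⟨h1, h2⟩; exact huv (by rw [h1, h2])
              rw [if_neg huv, d2 u v, d1 u v]
              split_ifs <;> first | rfl | omega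
        · have hval : max ((ChocOPT arr N f (s + 1) e C).1 + PySem.List.pyGetD arr s 0)
              ((ChocOPT arr N f s (e - 1) (ChocOPT arr N f (s + 1) e C).2).1
                + PySem.List.pyGetD arr e 0)
              = ChocVc arr N s e := by
            rw [v1, v2, chocVc_rec arr N s e (by omega), if_neg hm]
          simp only [ChocOPT, if_neg hes, if_neg hmem, if_neg hm]
          refine ⟨?_, ?_⟩
          · rw [PySem.Dict.getD_eq_get?_getD, PySem.Dict.get?_insert_self, hval]; rfl
          · intro u v
            rw [PySem.Dict.get?_insert]
            by_cases huv : (u, v) = ((s, e) : Int × Int)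
            · obtain ⟨hu, hv⟩ := Prod.mk.injEq .. ▸ huv
              rw [if_pos huv, hval, if_pos (by omega : s ≤ u ∧ u ≤ v ∧ v ≤ e), hu, hv]
            · have hne : ¬ (u = s ∧ v = e) := by
                intro ⟨h1, h2⟩; exact huv (by rw [h1, h2])
              rw [if_neg huv, d2 u v, d1 u v]
              split_ifs <;> first | rfl | omega

-- transport a table description along a pointwise-equivalent condition
lemma chocDesc_congr (C : PySem.Dict (Int × Int) Int) (f : Int → Int → Int)
    (P Q : Int → Int → Prop) [∀ u v, Decidable (P u v)] [∀ u v, Decidable (Q u v)]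
    (hPQ : ∀ u v, P u v ↔ Q u v)
    (h : ∀ u v : Int, C.get? (u, v) = if P u v then some (f u v) else none) :
    ∀ u v : Int, C.get? (u, v) = if Q u v then some (f u v) else none := by
  intro u v
  rw [h u v]
  by_cases hp : P u v
  · rw [if_pos hp, if_pos ((hPQ u v).1 hp)]
  · rw [if_neg hp, if_neg (fun hq => hp ((hPQ u v).2 hq))]

lemma chocRow_spec (arr : List Int) (N L : Int) (hN : N = (arr.length : Int) - 1)
    (hL1 : 1 ≤ L) :
    ∀ (fuel : Nat) (s : Int) (C : PySem.Dict (Int × Int) Int), 0 ≤ s →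
      ((arr.length : Int) - L + 1 - s).toNat ≤ fuel →
      (∀ u v : Int, C.get? (u, v) =
        if 0 ≤ u ∧ u ≤ v ∧ v ≤ N ∧ (v - u + 1 < L ∨ (v - u + 1 = L ∧ u < s))
        then some (ChocVc arr N u v) else none) →
      ∀ u v : Int, (ChocRow arr N L fuel s C).get? (u, v) =
        if 0 ≤ u ∧ u ≤ v ∧ v ≤ N ∧ v - u + 1 ≤ L
        then some (ChocVc arr N u v) else none := by
  intro fuel
  induction fuel with
  | zero =>
    intro s C hs hf hinv
    have hstop : (arr.length : Int) - L < s := by omega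
    simp only [ChocRow]
    exact chocDesc_congr C _ _ _ (by intro u v; omega) hinv
  | succ f ih =>
    intro s C hs hf hinv
    by_cases hcond : s ≤ PySem.List.len arr - L
    · rw [PySem.List.len_eq] at hcond
      have hleft : C.getD (s + 1, s + L - 1) 0 = ChocVc arr N (s + 1) (s + L - 1) := by
        by_cases hL2 : 2 ≤ L
        · rw [PySem.Dict.getD_eq_get?_getD, hinv, if_pos (by omega)]
          rfl
        · rw [PySem.Dict.getD_eq_get?_getD, hinv, if_neg (by omega),
            chocVc_neg arr N _ _ (by omega)]
          rfl
      have hright : C.getD (s, s + L - 1 - 1) 0 = ChocVc arr N s (s + L - 1 - 1) := by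
        by_cases hL2 : 2 ≤ L
        · rw [PySem.Dict.getD_eq_get?_getD, hinv, if_pos (by omega)]
          rfl
        · rw [PySem.Dict.getD_eq_get?_getD, hinv, if_neg (by omega),
            chocVc_neg arr N _ _ (by omega)]
          rfl
      have hrec := chocVc_rec arr N s (s + L - 1) (by omega)
      have hLL : s + L - 1 - s + 1 = L := by ring
      rw [hLL] at hrec
      simp only [ChocRow, PySem.List.len_eq, if_pos hcond]
      by_cases hm : PySem.Int.mod L 2 = PySem.Int.mod N 2
      · rw [if_pos hm] at hrec ⊢
        apply ih (s + 1) _ (by omega) (by omega)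
        intro u v
        rw [PySem.Dict.get?_insert]
        by_cases huv : (u, v) = ((s, s + L - 1) : Int × Int)
        · obtain ⟨hu, hv⟩ := Prod.mk.injEq .. ▸ huv
          rw [if_pos huv, if_pos (by omega), hleft, hright, ← hrec, hu, hv]
        · have hne : ¬ (u = s ∧ v = s + L - 1) := by
            intro ⟨h1, h2⟩; exact huv (by rw [h1, h2])
          rw [if_neg huv, hinv u v]
          split_ifs <;> first | rfl | omega
      · rw [if_neg hm] at hrec ⊢
        apply ih (s + 1) _ (by omega) (by omega)
        intro u v
        rw [PySem.Dict.get?_insert]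
        by_cases huv : (u, v) = ((s, s + L - 1) : Int × Int)
        · obtain ⟨hu, hv⟩ := Prod.mk.injEq .. ▸ huv
          rw [if_pos huv, if_pos (by omega), hleft, hright, ← hrec, hu, hv]
        · have hne : ¬ (u = s ∧ v = s + L - 1) := by
            intro ⟨h1, h2⟩; exact huv (by rw [h1, h2])
          rw [if_neg huv, hinv u v]
          split_ifs <;> first | rfl | omega
    · rw [PySem.List.len_eq] at hcond
      simp only [ChocRow, PySem.List.len_eq, if_neg hcond]
      exact chocDesc_congr C _ _ _ (by intro u v; omega) hinv

lemma chocFill_spec (arr : List Int) (N : Int) (hN : N = (arr.length : Int) - 1) :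
    ∀ (fuel : Nat) (L : Int) (C : PySem.Dict (Int × Int) Int), 1 ≤ L →
      ((arr.length : Int) + 1 - L).toNat ≤ fuel →
      (∀ u v : Int, C.get? (u, v) =
        if 0 ≤ u ∧ u ≤ v ∧ v ≤ N ∧ v - u + 1 < L
        then some (ChocVc arr N u v) else none) →
      ∀ u v : Int, (ChocFill arr N fuel L C).get? (u, v) =
        if 0 ≤ u ∧ u ≤ v ∧ v ≤ N then some (ChocVc arr N u v) else none := by
  intro fuel
  induction fuel with
  | zero =>
    intro L C hL1 hf hinv
    have hstop : (arr.length : Int) < L := by omega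
    simp only [ChocFill]
    exact chocDesc_congr C _ _ _ (by intro u v; omega) hinv
  | succ f ih =>
    intro L C hL1 hf hinv
    by_cases hcond : L ≤ PySem.List.len arr
    · rw [PySem.List.len_eq] at hcond
      simp only [ChocFill, PySem.List.len_eq, if_pos hcond]
      apply ih (L + 1) _ (by omega) (by omega)
      have hrow := chocRow_spec arr N L hN hL1 (arr.length + 1) 0 C (by omega)
        (by omega) (chocDesc_congr C _ _ _ (by intro u v; omega) hinv)
      exact chocDesc_congr _ _ _ _ (by intro u v; omega) hrow
    · rw [PySem.List.len_eq] at hcond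
      simp only [ChocFill, PySem.List.len_eq, if_neg hcond]
      exact chocDesc_congr C _ _ _ (by intro u v; omega) hinv

lemma chocFind_congr (arr : List Int) (C1 C2 : PySem.Dict (Int × Int) Int)
    (h : ∀ k : Int × Int, C1.get? k = C2.get? k) :
    ∀ (fuel : Nat) (s e : Int) (p : Bool) (S : List Int),
      ChocFindA arr C1 fuel s e p S = ChocFindB arr C2 fuel s e p S := by
  intro fuel
  induction fuel with
  | zero => intro s e p S; rfl
  | succ f ih =>
    intro s e p S
    have hd : ∀ k : Int × Int, C1.getD k 0 = C2.getD k 0 := by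
      intro k
      rw [PySem.Dict.getD_eq_get?_getD, PySem.Dict.getD_eq_get?_getD, h]
    simp only [ChocFindA, ChocFindB, hd, ih]

-- ===== VERDICT (by name: the statement is the Claim_ definition above) =====
theorem Chocolate_spec : Claim_equal_Chocolate := by
  intro arr _
  unfold Spec_Chocolate Chocolate Chocolate_alt
  simp only [PySem.List.len_eq]
  set N : Int := (arr.length : Int) - 1 with hN
  have hCempty : ChocClosed arr N PySem.Dict.empty := by
    intro u v h
    rw [PySem.Dict.get?_empty] at h
    simp at h
  obtain ⟨hv, hdesc⟩ := chocOPT_spec arr N (arr.length + 1) 0 N PySem.Dict.empty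
    (by omega) hCempty
  have hdescA : ∀ u v : Int,
      ((ChocOPT arr N (arr.length + 1) 0 N PySem.Dict.empty).2).get? (u, v) =
        if 0 ≤ u ∧ u ≤ v ∧ v ≤ N then some (ChocVc arr N u v) else none := by
    intro u v
    rw [hdesc u v, PySem.Dict.get?_empty]
  have hdescB : ∀ u v : Int,
      (ChocFill arr N (arr.length + 1) 1 PySem.Dict.empty).get? (u, v) =
        if 0 ≤ u ∧ u ≤ v ∧ v ≤ N then some (ChocVc arr N u v) else none := by
    apply chocFill_spec arr N hN (arr.length + 1) 1 PySem.Dict.empty (by omega) (by omega)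
    intro u v
    rw [PySem.Dict.get?_empty, if_neg (by omega)]
  have hsame : ∀ k : Int × Int,
      ((ChocOPT arr N (arr.length + 1) 0 N PySem.Dict.empty).2).get? k =
        (ChocFill arr N (arr.length + 1) 1 PySem.Dict.empty).get? k := by
    intro ⟨u, v⟩
    rw [hdescA u v, hdescB u v]
  refine Prod.ext ?_ ?_
  · show (ChocOPT arr N (arr.length + 1) 0 N PySem.Dict.empty).1 = _
    rw [hv, PySem.Dict.getD_eq_get?_getD, hdescB 0 N]
    by_cases h0 : 0 ≤ N
    · rw [if_pos (by omega)]
      rfl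
    · rw [if_neg (by omega), chocVc_neg arr N 0 N (by omega)]
      rfl
  · exact chocFind_congr arr _ _ hsame (arr.length + 1) 0 N true []
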